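-- pv_equiv track=rewrite | github.com/abecquet1/NSI | Première/P6/exercices_P6.py | syracuse_en_folie
-- ===== SOURCE A (Python) =====
-- def syracuse3(n):
--     a = n
--     compteur = 0
--     maxi = n
--     while n !=1:
--         if n%2==0:
--             n = n//2
--         else:
--             n = 3*n+1
--         compteur = compteur+1
--         if n>maxi:
--             maxi = n
--     return (compteur, maxi)
--
-- def syracuse_en_folie(n):
--     n_max, a_max = syracuse3(1)
--     for i in range(2, n+1):
--         n, a = syracuse3(i)
--         if n>n_max:
--             n_max = n
--         if a>a_max:
--             a_max = a
--     return n_max, a_max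
-- ===== SOURCE B (Python) =====
-- def syracuse_en_folie(n):
--     def stats(m):
--         if m == 1:
--             return (0, 1)
--         c, p = stats(m // 2 if m % 2 == 0 else 3 * m + 1)
--         return (c + 1, p if p > m else m)
--
--     top = n if n > 1 else 1
--     pairs = [stats(i) for i in range(1, top + 1)]
--     return (max(c for c, p in pairs), max(p for c, p in pairs))
-- ===== Notes on version B (the rewrite author's own statement) =====
-- stated objective: alternative
-- what changed: B replaces A's per-value while loop with three mutable accumulators by a structurally recursive stats function that combines (count+1, max) on the way back up the chain, and replaces A's fused accumulator sweep by collecting the per-value pairs and reducing each component with a max() pass.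
import Mathlib
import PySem

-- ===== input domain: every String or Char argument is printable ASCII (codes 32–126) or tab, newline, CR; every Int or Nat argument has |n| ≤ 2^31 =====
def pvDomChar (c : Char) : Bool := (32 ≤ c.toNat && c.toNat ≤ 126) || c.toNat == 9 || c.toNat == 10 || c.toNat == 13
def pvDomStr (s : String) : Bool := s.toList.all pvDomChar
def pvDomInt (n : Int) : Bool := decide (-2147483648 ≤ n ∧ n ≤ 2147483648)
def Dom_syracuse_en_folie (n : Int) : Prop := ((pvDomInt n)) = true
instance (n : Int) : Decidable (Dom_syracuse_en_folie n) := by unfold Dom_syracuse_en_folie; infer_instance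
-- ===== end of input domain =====

-- B computes each chain's (count, peak) by a recursive function combining on return and
-- reduces the collected pairs with two max passes, instead of A's fused accumulator loops;
-- same cost. A's while loop and B's recursion are ported with the same fuel constant
-- (a totality guard only; the equivalence proof is fuel-parametric).

def pvFuel : Nat := 100000

-- ===== PORT A =====
-- while n != 1: step; compteur += 1; maxi update   (fuel makes the loop total)
def syr3AuxA : Nat → Int → Int → Int → Int × Int
  | 0, _, compteur, maxi => (compteur, maxi)
  | fuel+1, n, compteur, maxi =>
    if n ≠ 1 then
      let n' := if PySem.Int.mod n 2 = 0 then PySem.Int.floordiv n 2 else 3 * n + 1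
      syr3AuxA fuel n' (compteur + 1) (if n' > maxi then n' else maxi)
    else (compteur, maxi)

def syr3A (n : Int) : Int × Int := syr3AuxA pvFuel n 0 n

def syracuse_en_folie (n : Int) : Int × Int :=
  let init := syr3A 1
  (PySem.List.pyRange 2 (n + 1) 1).foldl
    (fun acc i =>
      let r := syr3A i
      (if r.1 > acc.1 then r.1 else acc.1, if r.2 > acc.2 then r.2 else acc.2)) init

-- ===== PORT B =====
-- stats(m): (0,1) at 1, else (c+1, p if p > m else m) from the recursive call
-- (fuel guard; at fuel 0 the tail contributes (0, m))
def statsB : Nat → Int → Int × Int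
  | 0, m => (0, m)
  | fuel+1, m =>
    if m = 1 then (0, 1)
    else
      let r := statsB fuel (if PySem.Int.mod m 2 = 0 then PySem.Int.floordiv m 2 else 3 * m + 1)
      (r.1 + 1, if r.2 > m then r.2 else m)

-- max(gen) for the nonempty lists arising here; the none branch is unreachable (range ≠ [])
def pyMaxD (t : List Int) : Int :=
  match PySem.List.max? t (fun x => x) with
  | some v => v
  | none => 0

def syracuse_en_folie_alt (n : Int) : Int × Int :=
  let top := if n > 1 then n else 1
  let pairs := (PySem.List.pyRange 1 (top + 1) 1).map (statsB pvFuel)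
  (pyMaxD (pairs.map Prod.fst), pyMaxD (pairs.map Prod.snd))

-- ===== PRECONDITION & SPEC =====
def Spec_syracuse_en_folie (n : Int) (out : Int × Int) : Prop := out = syracuse_en_folie_alt n
instance (n : Int) (out : Int × Int) : Decidable (Spec_syracuse_en_folie n out) := by unfold Spec_syracuse_en_folie; infer_instance

-- ===== CLAIM (what is proved, stated in full; the proofs are below) =====
def Claim_equal_syracuse_en_folie : Prop := ∀ (n : Int), Dom_syracuse_en_folie n → Spec_syracuse_en_folie n (syracuse_en_folie n)

-- ===== LEMMAS AND PROOFS =====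

theorem statsB_snd_ge (f : Nat) : ∀ m : Int, m ≤ (statsB f m).2 := by
  induction f with
  | zero => intro m; simp [statsB]
  | succ f ih =>
    intro m
    by_cases h : m = 1
    · simp [statsB, h]
    · simp only [statsB, if_neg h]
      split_ifs <;> omega

theorem syr3Aux_eq (f : Nat) : ∀ (n c mx : Int), n ≤ mx →
    syr3AuxA f n c mx = (c + (statsB f n).1, max mx (statsB f n).2) := by
  induction f with
  | zero =>
    intro n c mx h
    simp [syr3AuxA, statsB]
    omega
  | succ f ih =>
    intro n c mx h
    by_cases h1 : n = 1
    · subst h1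
      simp [syr3AuxA, statsB]
      omega
    · set n' := (if PySem.Int.mod n 2 = 0 then PySem.Int.floordiv n 2 else 3 * n + 1) with hn'
      have hstep : syr3AuxA (f+1) n c mx =
          syr3AuxA f n' (c + 1) (if n' > mx then n' else mx) := by
        rw [hn', syr3AuxA, if_pos h1]
      have hmx : (if n' > mx then n' else mx) = max mx n' := by split_ifs <;> omega
      rw [hstep, hmx, ih n' (c+1) (max mx n') (le_max_right _ _)]
      have hstats : statsB (f+1) n =
          ((statsB f n').1 + 1, if (statsB f n').2 > n then (statsB f n').2 else n) := by
        rw [hn']; simp only [statsB, if_neg h1]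
      rw [hstats]
      have hge : n' ≤ (statsB f n').2 := statsB_snd_ge f n'
      refine Prod.ext (by simp only; omega) (by simp only; split_ifs <;> omega)

theorem syr3A_eq (n : Int) : syr3A n = statsB pvFuel n := by
  unfold syr3A
  rw [syr3Aux_eq pvFuel n 0 n le_rfl]
  have := statsB_snd_ge pvFuel n
  refine Prod.ext (by simp) (by simp only; omega)

theorem outer_fold (l : List Int) : ∀ (acc : Int × Int),
    l.foldl (fun acc i =>
      let r := syr3A i
      (if r.1 > acc.1 then r.1 else acc.1, if r.2 > acc.2 then r.2 else acc.2)) acc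
    = ((l.map (fun i => (statsB pvFuel i).1)).foldl max acc.1,
       (l.map (fun i => (statsB pvFuel i).2)).foldl max acc.2) := by
  induction l with
  | nil => intro acc; simp
  | cons x t ih =>
    intro acc
    simp only [List.foldl, List.map]
    rw [ih, syr3A_eq]
    congr 1 <;> congr 1
    · simp only; split_ifs <;> omega
    · simp only; split_ifs <;> omega

-- ===== VERDICT (by name: the statement is the Claim_ definition above) =====
theorem syracuse_en_folie_spec : Claim_equal_syracuse_en_folie := by
  intro n _
  unfold Spec_syracuse_en_folie syracuse_en_folie syracuse_en_folie_alt
  by_cases h : n ≤ 1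
  · have htop : (if n > 1 then n else 1) = 1 := by split_ifs <;> omega
    have hr2 : PySem.List.pyRange 2 (n + 1) 1 = [] := PySem.List.pyRange_one_eq_nil (by omega)
    rw [htop, hr2]
    dsimp only
    have hr1 : PySem.List.pyRange 1 (1 + 1) 1 = [1] := PySem.List.pyRange_one_singleton 1
    rw [hr1]
    simp only [List.foldl, List.map]
    rw [syr3A_eq]
    unfold pyMaxD
    rw [PySem.List.max?_id_cons, PySem.List.max?_id_cons]
    simp [List.foldl]
  · have htop : (if n > 1 then n else 1) = n := by split_ifs <;> omega
    rw [htop]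
    dsimp only
    have hr : PySem.List.pyRange 1 (n + 1) 1 = 1 :: PySem.List.pyRange 2 (n + 1) 1 :=
      PySem.List.pyRange_one_cons (by omega)
    rw [hr]
    simp only [List.map, List.map_map]
    rw [outer_fold (PySem.List.pyRange 2 (n + 1) 1) (syr3A 1), syr3A_eq]
    unfold pyMaxD
    rw [PySem.List.max?_id_cons, PySem.List.max?_id_cons]
    simp [Function.comp_def]
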